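-- pv_equiv track=rewrite | github.com/casics/annotator | annotator.py | max_annotations
-- ===== SOURCE A (Python) =====
-- def max_annotations(annotated):
--     total = 0
--     repos = []
--     for id, entry in annotated.items():
--         this_len = len(entry['terms'])
--         if this_len > total:
--             total = this_len
--             repos = [entry]
--         elif this_len == total:
--             repos.append(entry)
--     return (total, repos)
-- ===== SOURCE B (Python) =====
-- def max_annotations(annotated):
--     entries = list(annotated.values())
--     total = max((len(e['terms']) for e in entries), default=0)
--     repos = [e for e in entries if len(e['terms']) == total]
--     return (total, repos)
-- ===== Notes on version B (the rewrite author's own statement) =====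
-- stated objective: simpler
-- what changed: Replaces A's single-pass running-best loop with explicit tie tracking by a stateless max-then-filter decomposition (compute the maximum term count, then keep the entries attaining it).
import Mathlib
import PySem

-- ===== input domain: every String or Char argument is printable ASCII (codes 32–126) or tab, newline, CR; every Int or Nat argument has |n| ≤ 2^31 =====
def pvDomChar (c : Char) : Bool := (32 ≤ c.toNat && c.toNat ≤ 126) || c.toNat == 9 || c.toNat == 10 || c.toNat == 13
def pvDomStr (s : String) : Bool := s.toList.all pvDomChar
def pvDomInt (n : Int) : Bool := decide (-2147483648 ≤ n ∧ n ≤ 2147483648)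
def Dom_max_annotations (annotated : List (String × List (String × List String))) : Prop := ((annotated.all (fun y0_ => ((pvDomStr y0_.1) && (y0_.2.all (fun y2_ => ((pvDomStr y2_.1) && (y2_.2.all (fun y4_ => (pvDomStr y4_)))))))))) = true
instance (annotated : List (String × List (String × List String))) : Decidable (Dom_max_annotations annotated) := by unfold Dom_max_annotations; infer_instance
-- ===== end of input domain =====

-- B replaces A's running-best loop with tie tracking by a stateless max-then-filter decomposition (same cost, simpler).


-- len(entry['terms']) as an Int; under Pre_ the 'terms' key is present, so getD's default is never used
def pvTermsLen (e : List (String × List String)) : Int :=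
  ((PySem.Dict.mk e).getD "terms" []).length

-- ===== PORT A =====
def max_annotations (annotated : List (String × List (String × List String))) : Int × (List (List (String × List String))) :=
  annotated.foldl
    (fun st p =>
      let this_len : Int := pvTermsLen p.2
      if this_len > st.1 then (this_len, [p.2])
      else if this_len = st.1 then (st.1, st.2 ++ [p.2])
      else st)
    (0, [])

-- ===== PORT B =====
def max_annotations_alt (annotated : List (String × List (String × List String))) : Int × (List (List (String × List String))) :=
  let entries := annotated.map Prod.snd
  let total : Int := (PySem.List.max? (entries.map pvTermsLen) (fun x => x)).getD 0
  let repos := entries.filter (fun e => pvTermsLen e = total)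
  (total, repos)

-- ===== PRECONDITION & SPEC =====
-- Pre_ excludes inputs where an entry lacks a 'terms' key (A raises KeyError there), and association
-- lists with duplicate keys, which cannot arise from a Python dict (a dict has unique keys).
def Pre_max_annotations (annotated : List (String × List (String × List String))) : Prop :=
  (annotated.map Prod.fst).Nodup ∧
  ∀ p ∈ annotated, (p.2.map Prod.fst).Nodup ∧ "terms" ∈ p.2.map Prod.fst
instance (annotated : List (String × List (String × List String))) : Decidable (Pre_max_annotations annotated) := by unfold Pre_max_annotations; infer_instance
def pvWitness_max_annotations : (List (String × List (String × List String))) :=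
  [("r1", [("terms", ["a", "b"])]), ("r2", [("terms", ["c", "d"])])]

def Spec_max_annotations (annotated : List (String × List (String × List String))) (out : Int × (List (List (String × List String)))) : Prop := out = max_annotations_alt annotated
instance (annotated : List (String × List (String × List String))) (out : Int × (List (List (String × List String)))) : Decidable (Spec_max_annotations annotated out) := by unfold Spec_max_annotations; infer_instance

-- ===== CLAIM (what is proved, stated in full; the proofs are below) =====
def Claim_equal_max_annotations : Prop := ∀ (annotated : List (String × List (String × List String))), Dom_max_annotations annotated → Pre_max_annotations annotated → Spec_max_annotations annotated (max_annotations annotated)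

-- ===== LEMMAS AND PROOFS =====

-- running max of term lengths (what A's 'total' variable tracks)
def pvM (l : List (String × List (String × List String))) : Int :=
  l.foldl (fun acc p => max acc (pvTermsLen p.2)) 0

theorem pvM_nonneg (l : List (String × List (String × List String))) : 0 ≤ pvM l :=
  (PySem.List.le_foldl_max_int l (fun p => pvTermsLen p.2) 0).1

theorem pvM_isMax (l : List (String × List (String × List String))) :
    ∀ p ∈ l, pvTermsLen p.2 ≤ pvM l :=
  (PySem.List.le_foldl_max_int l (fun p => pvTermsLen p.2) 0).2

theorem pvM_append (l : List (String × List (String × List String))) (x : String × List (String × List String)) :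
    pvM (l ++ [x]) = max (pvM l) (pvTermsLen x.2) := by
  simp [pvM, List.foldl_append]

-- A's fold computes the max and the filtered list
theorem pvFold_eq (l : List (String × List (String × List String))) :
    max_annotations l = (pvM l, (l.filter (fun p => pvTermsLen p.2 = pvM l)).map Prod.snd) := by
  induction l using List.reverseRecOn with
  | nil => simp [max_annotations, pvM]
  | append_singleton t x ih =>
    have hmax := pvM_isMax t
    have ih' := ih
    rw [max_annotations] at ih' ⊢
    rw [List.foldl_append, ih']
    simp only [List.foldl_cons, List.foldl_nil, pvM_append]
    by_cases h1 : pvTermsLen x.2 > pvM t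
    · have hm : max (pvM t) (pvTermsLen x.2) = pvTermsLen x.2 := by omega
      have hf : t.filter (fun p => decide (pvTermsLen p.2 = pvTermsLen x.2)) = [] := by
        apply List.filter_eq_nil_iff.mpr
        intro p hp hd
        have := hmax p hp
        simp at hd; omega
      simp [h1, hm, List.filter_append, hf]
    · by_cases h2 : pvTermsLen x.2 = pvM t
      · have hm : max (pvM t) (pvTermsLen x.2) = pvM t := by omega
        simp [h1, h2, hm, List.filter_append]
      · have hm : max (pvM t) (pvTermsLen x.2) = pvM t := by
          have := pvM_nonneg t; omega
        have hf : decide (pvTermsLen x.2 = pvM t) = false := by simp [h2]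
        simp [h1, h2, hm, List.filter_append, hf]

-- B's max-with-default equals the running max from 0
theorem pvTotal_eq (l : List (String × List (String × List String))) :
    (PySem.List.max? ((l.map Prod.snd).map pvTermsLen) (fun x => x)).getD 0 = pvM l := by
  cases l with
  | nil => simp [pvM, PySem.List.max?]
  | cons x t =>
    simp only [List.map_cons, PySem.List.max?_id_cons, Option.getD_some]
    have hx : (0 : Int) ≤ pvTermsLen x.2 := by
      simp [pvTermsLen]
    have : pvM (x :: t) = (t.map (fun p => pvTermsLen p.2)).foldl max (pvTermsLen x.2) := by
      simp [pvM, List.foldl_map, max_eq_right hx]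
    rw [this]
    simp [List.foldl_map]

-- ===== VERDICT (by name: the statement is the Claim_ definition above) =====
theorem max_annotations_spec : Claim_equal_max_annotations := by
  intro annotated _ _
  show max_annotations annotated = max_annotations_alt annotated
  rw [pvFold_eq]
  simp only [max_annotations_alt, pvTotal_eq]
  congr 1
  rw [List.filter_map]
  rfl
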